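-- pv_equiv track=rewrite | github.com/AbdurrahmanAdni/Shape-Recognition | GUI.py | isSegilimaSamaSisi
-- ===== SOURCE A (Python) =====
-- import itertools
-- import itertools
--
-- def isSegilimaSamaSisi(a, myList):
--     if (a == 5) :
--         counter = 0
--         # combList = []
--         for L in range(0, len(myList)+1):
--             for subset in itertools.combinations(myList, L):
--                 if(len(subset) == 2) :
--                     if (abs(subset[0] - subset[1]) <=11) :
--                         counter = counter + 1
--         if (counter == 10) :
--             return "sisiSamaPanjang = 5"
--         else :
--             return "/"
--     else :
--         return "/"
-- ===== SOURCE B (Python) =====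
-- def isSegilimaSamaSisi(a, myList):
--     if a != 5:
--         return "/"
--     counter = 0
--     rest = myList
--     while rest:
--         x, rest = rest[0], rest[1:]
--         counter += sum(1 for y in rest if abs(x - y) <= 11)
--     return "sisiSamaPanjang = 5" if counter == 10 else "/"
-- ===== Notes on version B (the rewrite author's own statement) =====
-- stated objective: simpler
-- what changed: B counts close pairs with a single pass over list tails (each element against its suffix) instead of enumerating subsets of every size and filtering out the size-2 ones.
import Mathlib
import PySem

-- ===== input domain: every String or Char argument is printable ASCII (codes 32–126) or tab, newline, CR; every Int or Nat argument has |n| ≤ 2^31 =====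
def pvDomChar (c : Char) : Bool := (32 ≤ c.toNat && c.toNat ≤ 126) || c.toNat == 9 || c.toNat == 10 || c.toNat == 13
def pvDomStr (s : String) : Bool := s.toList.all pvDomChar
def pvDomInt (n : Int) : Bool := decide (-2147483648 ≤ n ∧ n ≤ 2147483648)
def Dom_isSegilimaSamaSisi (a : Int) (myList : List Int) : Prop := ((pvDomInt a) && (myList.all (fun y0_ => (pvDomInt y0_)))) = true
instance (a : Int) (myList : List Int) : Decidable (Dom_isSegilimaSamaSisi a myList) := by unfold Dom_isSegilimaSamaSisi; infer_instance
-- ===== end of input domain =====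

-- B counts the close pairs directly, one pass over list tails, instead of enumerating subsets of every size and filtering the size-2 ones; same return value everywhere.

-- ===== PORT A =====
-- itertools.combinations(xs, k) in itertools' order (subsequences of length k, lexicographic by index)
def pvCombos : Nat → List Int → List (List Int)
  | 0, _ => [[]]
  | _ + 1, [] => []
  | k + 1, x :: xs => (pvCombos k xs).map (fun s => x :: s) ++ pvCombos (k + 1) xs

def isSegilimaSamaSisi (a : Int) (myList : List Int) : String :=
  if a = 5 then
    let counter : Int :=
      (PySem.List.pyRange 0 ((myList.length : Int) + 1) 1).foldl (fun counter L =>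
        (pvCombos L.toNat myList).foldl (fun counter subset =>
          if subset.length = 2 then
            if |((PySem.List.pyGet? subset 0).getD 0) - ((PySem.List.pyGet? subset 1).getD 0)| ≤ 11 then
              counter + 1
            else counter
          else counter) counter) 0
    if counter = 10 then "sisiSamaPanjang = 5" else "/"
  else "/"

-- ===== PORT B =====
-- one pass over tails: each head is compared with every element of its suffix
def pvClosePairs : List Int → Int
  | [] => 0
  | x :: rest => pvClosePairs rest + ((rest.filter (fun y => |x - y| ≤ 11)).length : Int)

def isSegilimaSamaSisi_alt (a : Int) (myList : List Int) : String :=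
  if a ≠ 5 then "/"
  else if pvClosePairs myList = 10 then "sisiSamaPanjang = 5" else "/"

-- ===== PRECONDITION & SPEC =====
def Spec_isSegilimaSamaSisi (a : Int) (myList : List Int) (out : String) : Prop := out = isSegilimaSamaSisi_alt a myList
instance (a : Int) (myList : List Int) (out : String) : Decidable (Spec_isSegilimaSamaSisi a myList out) := by unfold Spec_isSegilimaSamaSisi; infer_instance

-- ===== CLAIM (what is proved, stated in full; the proofs are below) =====
def Claim_equal_isSegilimaSamaSisi : Prop := ∀ (a : Int) (myList : List Int), Dom_isSegilimaSamaSisi a myList → Spec_isSegilimaSamaSisi a myList (isSegilimaSamaSisi a myList)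

-- ===== LEMMAS AND PROOFS =====

-- every member of pvCombos k xs has length k
theorem pvCombos_length : ∀ (k : Nat) (xs : List Int), ∀ s ∈ pvCombos k xs, s.length = k := by
  intro k
  induction k with
  | zero => intro xs s hs; simp [pvCombos] at hs; simp [hs]
  | succ k ih =>
    intro xs
    induction xs with
    | nil => intro s hs; simp [pvCombos] at hs
    | cons x xs ihx =>
      intro s hs
      simp only [pvCombos, List.mem_append, List.mem_map] at hs
      rcases hs with ⟨t, ht, rfl⟩ | hs
      · simp [ih xs t ht]
      · exact ihx s hs

-- the inner fold adds the number of subsets passing both guards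
def pvInner (c : Int) (subset : List Int) : Int :=
  if subset.length = 2 then
    if |((PySem.List.pyGet? subset 0).getD 0) - ((PySem.List.pyGet? subset 1).getD 0)| ≤ 11 then
      c + 1
    else c
  else c

def pvCount (l : List (List Int)) : Int :=
  ((l.filter (fun s => decide (s.length = 2) &&
      decide (|((PySem.List.pyGet? s 0).getD 0) - ((PySem.List.pyGet? s 1).getD 0)| ≤ 11))).length : Int)

theorem foldl_pvInner (l : List (List Int)) : ∀ c : Int, l.foldl pvInner c = c + pvCount l := by
  induction l with
  | nil => intro c; simp [pvCount]
  | cons s l ih =>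
    intro c
    rw [List.foldl_cons, ih]
    unfold pvInner pvCount
    rw [List.filter_cons]
    by_cases h1 : s.length = 2
    · by_cases h2 : |((PySem.List.pyGet? s 0).getD 0) - ((PySem.List.pyGet? s 1).getD 0)| ≤ 11
      · rw [if_pos h1, if_pos h2,
            if_pos (by simp only [Bool.and_eq_true, decide_eq_true_eq]; exact ⟨h1, h2⟩)]
        simp only [List.length_cons]; push_cast; ring
      · rw [if_pos h1, if_neg h2,
            if_neg (by simp only [Bool.and_eq_true, decide_eq_true_eq]; tauto)]
    · rw [if_neg h1, if_neg (by simp only [Bool.and_eq_true, decide_eq_true_eq]; tauto)]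

theorem pvCount_ne_two (k : Nat) (hk : k ≠ 2) (xs : List Int) : pvCount (pvCombos k xs) = 0 := by
  unfold pvCount
  rw [List.filter_eq_nil_iff.mpr]
  · simp
  · intro s hs
    have := pvCombos_length k xs s hs
    simp [this, hk]

theorem pvCombos_one (xs : List Int) : pvCombos 1 xs = xs.map (fun x => [x]) := by
  induction xs with
  | nil => simp [pvCombos]
  | cons x xs ih => simp [pvCombos, ih]

theorem pvCount_append (l₁ l₂ : List (List Int)) : pvCount (l₁ ++ l₂) = pvCount l₁ + pvCount l₂ := by
  unfold pvCount
  rw [List.filter_append, List.length_append]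
  push_cast; ring

theorem pvCount_map (x : Int) (xs : List Int) :
    pvCount (xs.map (fun y => [x, y])) = ((xs.filter (fun y => |x - y| ≤ 11)).length : Int) := by
  induction xs with
  | nil => simp [pvCount]
  | cons y ys ih =>
    unfold pvCount at ih ⊢
    rw [List.map_cons, List.filter_cons, List.filter_cons]
    by_cases h : |x - y| ≤ 11
    · rw [if_pos (by simp [h]), if_pos (by simp [h])]
      simp only [List.length_cons]
      push_cast at ih ⊢
      omega
    · rw [if_neg (by simp [h]), if_neg (by simp [h])]
      exact ih

theorem pvCount_two (xs : List Int) : pvCount (pvCombos 2 xs) = pvClosePairs xs := by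
  induction xs with
  | nil => simp [pvCombos, pvCount, pvClosePairs]
  | cons x xs ih =>
    show pvCount ((pvCombos 1 xs).map (fun s => x :: s) ++ pvCombos 2 xs) = _
    rw [pvCount_append, ih, pvCombos_one, List.map_map, pvClosePairs]
    rw [show ((fun s => x :: s) ∘ fun y => [y]) = (fun y => [x, y]) from rfl, pvCount_map]
    ring

-- the outer fold over range(0, n+1): for n = myList.length, only L = 2 contributes
theorem outer_fold (xs : List Int) (m : Nat) :
    ∀ c : Int, (PySem.List.pyRange 0 ((m : Int)) 1).foldl
      (fun counter L => (pvCombos L.toNat xs).foldl pvInner counter) c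
    = c + (if 2 < m then pvCount (pvCombos 2 xs) else 0) := by
  induction m with
  | zero => intro c; simp [PySem.List.pyRange_one_eq_nil]
  | succ m ih =>
    intro c
    rw [show ((m + 1 : Nat) : Int) = (m : Int) + 1 by push_cast; ring,
        PySem.List.pyRange_one_succ_right (by positivity), List.foldl_append, ih]
    simp only [List.foldl_cons, List.foldl_nil, foldl_pvInner]
    by_cases h2 : (m : Int).toNat = 2
    · have hm : m = 2 := by omega
      subst hm
      simp
    · rw [pvCount_ne_two _ h2]
      have : ((m : Int).toNat) = m := by omega
      by_cases hm : 2 < m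
      · simp [hm, show 2 < m + 1 by omega]
      · have hmm : m ≠ 2 := by omega
        simp [show ¬ 2 < m from hm, show ¬ 2 < m + 1 by omega]

theorem pvClosePairs_short (xs : List Int) (h : xs.length ≤ 1) : pvClosePairs xs = 0 := by
  match xs, h with
  | [], _ => rfl
  | [x], _ => simp [pvClosePairs]

-- ===== VERDICT (by name: the statement is the Claim_ definition above) =====
theorem isSegilimaSamaSisi_spec : Claim_equal_isSegilimaSamaSisi := by
  intro a myList _
  unfold Spec_isSegilimaSamaSisi isSegilimaSamaSisi isSegilimaSamaSisi_alt
  by_cases ha : a = 5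
  · simp only [ha, ne_eq, not_true_eq_false, if_false]
    have := outer_fold myList (myList.length + 1) 0
    rw [show ((myList.length + 1 : Nat) : Int) = (myList.length : Int) + 1 by push_cast; ring] at this
    rw [show (fun (counter : Int) (L : Int) => (pvCombos L.toNat myList).foldl
          (fun counter subset => if subset.length = 2 then
            if |((PySem.List.pyGet? subset 0).getD 0) - ((PySem.List.pyGet? subset 1).getD 0)| ≤ 11 then
              counter + 1 else counter else counter) counter)
        = (fun counter L => (pvCombos L.toNat myList).foldl pvInner counter) from rfl, this]
    by_cases h : 2 < myList.length + 1
    · rw [if_pos h, pvCount_two]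
      simp
    · rw [if_neg h, pvClosePairs_short myList (by omega)]
      simp
  · simp [ha]
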